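-- pv_equiv track=rewrite | github.com/yashkp1234/baseball-swing-analyzer | src/baseball_swing_analyzer/metrics.py | phase_durations
-- ===== SOURCE A (Python) =====
-- def phase_durations(phase_labels: list[str]) -> dict[str, int]:
--     """Length of the longest contiguous run per phase label."""
--     if not phase_labels:
--         return {}
--     out: dict[str, int] = {}
--     i = 0
--     while i < len(phase_labels):
--         j = i
--         while j < len(phase_labels) and phase_labels[j] == phase_labels[i]:
--             j += 1
--         run = j - i
--         out[phase_labels[i]] = max(out.get(phase_labels[i], 0), run)
--         i = j
--     return out
-- ===== SOURCE B (Python) =====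
-- def phase_durations(phase_labels: list[str]) -> dict[str, int]:
--     """Length of the longest contiguous run per phase label."""
--     if not phase_labels:
--         return {}
--     n = len(phase_labels)
--     # stage 1: indices where the label changes, framed by 0 and n
--     cuts = [0] + [i for i in range(1, n) if phase_labels[i] != phase_labels[i - 1]] + [n]
--     # stage 2: fold maxima over the (start, end) segments
--     out: dict[str, int] = {}
--     for start, end in zip(cuts, cuts[1:]):
--         label = phase_labels[start]
--         out[label] = max(out.get(label, 0), end - start)
--     return out
-- ===== Notes on version B (the rewrite author's own statement) =====
-- stated objective: alternative
-- what changed: Replaces A's nested-while two-pointer run walk with two staged passes: a comprehension collecting the boundary indices where the label changes, then a fold of maxima over the pairwise-zipped (start,end) segments.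
import Mathlib
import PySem

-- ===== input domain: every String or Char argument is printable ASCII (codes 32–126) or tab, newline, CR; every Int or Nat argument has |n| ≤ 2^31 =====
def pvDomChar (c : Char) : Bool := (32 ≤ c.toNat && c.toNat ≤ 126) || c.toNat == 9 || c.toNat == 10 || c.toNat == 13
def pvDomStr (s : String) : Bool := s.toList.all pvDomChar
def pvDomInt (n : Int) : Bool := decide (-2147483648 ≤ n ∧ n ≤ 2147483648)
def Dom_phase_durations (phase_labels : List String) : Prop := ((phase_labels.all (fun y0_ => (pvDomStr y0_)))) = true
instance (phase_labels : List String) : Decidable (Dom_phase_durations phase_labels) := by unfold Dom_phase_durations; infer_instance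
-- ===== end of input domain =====

-- B replaces A's nested-while two-pointer run walk with two staged passes: a comprehension
-- collecting the boundary indices where the label changes, then a fold of maxima over the
-- pairwise-zipped (start, end) segments (objective: alternative; same cost).

-- ===== PORT A =====
-- A's inner 'while j < len and labels[j] == labels[i]' loop: number of leading elements of the
-- remainder equal to the run's first element (so run = j - i = 1 + this count).
def pvCountRun (x : String) : List String → Nat
  | [] => 0
  | y :: ys => if y == x then pvCountRun x ys + 1 else 0

-- A's outer while loop over i, carrying 'out'; advancing i to j = dropping the rest of the run.
def pvGoA (l : List String) (out : PySem.Dict String Int) : PySem.Dict String Int :=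
  match l with
  | [] => out
  | x :: xs =>
    let c := pvCountRun x xs
    let run : Int := ((1 + c : Nat) : Int)
    pvGoA (xs.drop c) (out.insert x (max (out.getD x 0) run))
termination_by l.length
decreasing_by simp

def phase_durations (phase_labels : List String) : List (String × Int) :=
  if phase_labels = [] then []
  else (pvGoA phase_labels PySem.Dict.empty).items

-- ===== PORT B =====
-- stage 1 of Source B: [i for i in range(1, n) if phase_labels[i] != phase_labels[i-1]]
-- (indices are always in range in Python, so indexing is the total pyGetD form)
def pvChanges (l : List String) : List Int :=
  (PySem.List.pyRange 1 (l.length : Int) 1).filter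
    (fun i => !(PySem.List.pyGetD l i "" == PySem.List.pyGetD l (i - 1) ""))

-- cuts = [0] + changes + [n]
def pvCuts (l : List String) : List Int :=
  [0] ++ pvChanges l ++ [(l.length : Int)]

-- stage 2 of Source B: fold maxima over zip(cuts, cuts[1:])
def phase_durations_alt (phase_labels : List String) : List (String × Int) :=
  if phase_labels = [] then []
  else
    (((pvCuts phase_labels).zip ((pvCuts phase_labels).drop 1)).foldl
      (fun out se =>
        let label := PySem.List.pyGetD phase_labels se.1 ""
        out.insert label (max (out.getD label 0) (se.2 - se.1)))
      PySem.Dict.empty).items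

-- ===== PRECONDITION & SPEC =====
def Spec_phase_durations (phase_labels : List String) (out : List (String × Int)) : Prop := out = phase_durations_alt phase_labels
instance (phase_labels : List String) (out : List (String × Int)) : Decidable (Spec_phase_durations phase_labels out) := by unfold Spec_phase_durations; infer_instance

-- ===== CLAIM (what is proved, stated in full; the proofs are below) =====
def Claim_equal_phase_durations : Prop := ∀ (phase_labels : List String), Dom_phase_durations phase_labels → Spec_phase_durations phase_labels (phase_durations phase_labels)

-- ===== LEMMAS AND PROOFS =====

-- Nat-side mirror of stage 1 (the change indices) and of the cuts list.
def pvChg (l : List String) : List Nat :=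
  (List.range' 1 (l.length - 1)).filter
    (fun i => !(l.getD i "" == l.getD (i - 1) ""))

def pvCutsN (l : List String) : List Nat := 0 :: pvChg l ++ [l.length]

-- the (label, length) view of the segments of the cuts list
def pvSegs (l : List String) : List (String × Int) :=
  ((pvCutsN l).zip ((pvCutsN l).drop 1)).map
    (fun se => (l.getD se.1 "", (se.2 : Int) - (se.1 : Int)))

-- A's run decomposition as a list of (label, run length) pairs.
def pvRuns : List String → List (String × Int)
  | [] => []
  | x :: xs =>
    (x, ((1 + pvCountRun x xs : Nat) : Int)) :: pvRuns (xs.drop (pvCountRun x xs))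
termination_by l => l.length
decreasing_by simp

theorem pvCountRun_le (x : String) (xs : List String) : pvCountRun x xs ≤ xs.length := by
  induction xs with
  | nil => simp [pvCountRun]
  | cons y ys ih =>
    by_cases h : (y == x) = true
    · simp [pvCountRun, h]; omega
    · simp [pvCountRun, h]

theorem pvCountRun_getD (x : String) (xs : List String) (i : Nat)
    (h : i < pvCountRun x xs) : xs.getD i "" = x := by
  induction xs generalizing i with
  | nil => simp [pvCountRun] at h
  | cons y ys ih =>
    by_cases hy : (y == x) = true
    · match i with
      | 0 => simpa using hy
      | i + 1 =>
        simp only [pvCountRun, hy, if_pos] at h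
        simpa using ih i (by omega)
    · simp [pvCountRun, hy] at h

theorem pvCountRun_drop_ne (x : String) (xs : List String) (y : String) (ys : List String)
    (h : xs.drop (pvCountRun x xs) = y :: ys) : (y == x) = false := by
  induction xs with
  | nil => simp at h
  | cons z zs ih =>
    by_cases hz : (z == x) = true
    · simp only [pvCountRun, hz, if_pos, List.drop_succ_cons] at h
      exact ih h
    · simp only [pvCountRun, hz, if_neg, Bool.false_eq_true, not_false_iff, List.drop_zero] at h
      cases h
      simpa using hz

theorem pvGetD_cons_x (x : String) (xs : List String) (i : Nat)
    (h : i ≤ pvCountRun x xs) : (x :: xs).getD i "" = x := by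
  match i with
  | 0 => rfl
  | i + 1 =>
    simp only [List.getD_cons_succ]
    exact pvCountRun_getD x xs i (by omega)

theorem pvGetD_cons_shift (x : String) (xs : List String) (j : Nat) :
    (x :: xs).getD (pvCountRun x xs + 1 + j) "" = (xs.drop (pvCountRun x xs)).getD j "" := by
  have h1 : pvCountRun x xs + 1 + j = (pvCountRun x xs + j) + 1 := by omega
  rw [h1, List.getD_cons_succ]
  simp [List.getD_eq_getElem?_getD, List.getElem?_drop]

theorem pvChg_cons_nil (x : String) (xs : List String)
    (h : xs.drop (pvCountRun x xs) = []) : pvChg (x :: xs) = [] := by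
  have hc : xs.length = pvCountRun x xs := by
    have := List.length_drop (l := xs) (i := pvCountRun x xs)
    rw [h] at this
    have := pvCountRun_le x xs
    simp at *; omega
  apply List.filter_eq_nil_iff.mpr
  intro i hi
  have hmem : 1 ≤ i ∧ i < 1 + (xs.length) := by
    have := (List.mem_range'_1).mp (by simpa using hi)
    omega
  have h1 : (x :: xs).getD i "" = x := pvGetD_cons_x x xs i (by omega)
  have h2 : (x :: xs).getD (i - 1) "" = x := pvGetD_cons_x x xs (i - 1) (by omega)
  simp only [h1, h2, beq_self_eq_true, Bool.not_true]
  exact Bool.false_ne_true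

theorem pvChg_cons (x : String) (xs : List String) (y : String) (ys : List String)
    (h : xs.drop (pvCountRun x xs) = y :: ys) :
    pvChg (x :: xs) =
      (pvCountRun x xs + 1) ::
        (pvChg (y :: ys)).map (fun i => pvCountRun x xs + 1 + i) := by
  set c := pvCountRun x xs with hc
  have hlen : xs.length = c + (ys.length + 1) := by
    have hld := List.length_drop (l := xs) (i := c)
    rw [h] at hld
    have := pvCountRun_le x xs
    simp at hld; omega
  have hrange : List.range' 1 xs.length =
      List.range' 1 c ++ ((1 + c) :: List.range' (1 + c + 1) ys.length) := by
    rw [hlen, ← List.range'_append_1, List.range'_succ]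
  show (List.range' 1 ((x :: xs).length - 1)).filter _ = _
  simp only [List.length_cons, Nat.add_sub_cancel]
  rw [hrange, List.filter_append]
  have hfirst : (List.range' 1 c).filter
      (fun i => !((x :: xs).getD i "" == (x :: xs).getD (i - 1) "")) = [] := by
    apply List.filter_eq_nil_iff.mpr
    intro i hi
    have hmem := (List.mem_range'_1).mp hi
    have h1 : (x :: xs).getD i "" = x := pvGetD_cons_x x xs i (by omega)
    have h2 : (x :: xs).getD (i - 1) "" = x := pvGetD_cons_x x xs (i - 1) (by omega)
    simp only [h1, h2, beq_self_eq_true, Bool.not_true]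
    exact Bool.false_ne_true
  rw [hfirst]
  have hcut : (!((x :: xs).getD (1 + c) "" == (x :: xs).getD (1 + c - 1) "")) = true := by
    have h1 : (x :: xs).getD (1 + c) "" = y := by
      have := pvGetD_cons_shift x xs 0
      rw [h] at this
      simpa [Nat.add_comm] using this
    have h2 : (x :: xs).getD (1 + c - 1) "" = x := pvGetD_cons_x x xs (1 + c - 1) (by omega)
    rw [h1, h2]
    simp [pvCountRun_drop_ne x xs y ys h]
  simp only [List.nil_append, List.filter_cons, hcut, if_true]
  have hshiftrange : List.range' (1 + c + 1) ys.length =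
      (List.range' 1 ys.length).map (fun i => (c + 1) + i) := by
    rw [List.map_add_range' (a := c + 1) (s := 1) (n := ys.length)]
    congr 1
    omega
  rw [hshiftrange, List.filter_map]
  have hcong : (List.range' 1 ys.length).filter
        ((fun i => !((x :: xs).getD i "" == (x :: xs).getD (i - 1) "")) ∘ (fun i => (c + 1) + i)) =
      (List.range' 1 ys.length).filter
        (fun i => !((y :: ys).getD i "" == (y :: ys).getD (i - 1) "")) := by
    apply List.filter_congr
    intro i hi
    have hmem := (List.mem_range'_1).mp hi
    have h1 : (x :: xs).getD (c + 1 + i) "" = (y :: ys).getD i "" := by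
      have := pvGetD_cons_shift x xs i
      rw [h] at this
      exact this
    have h2 : (x :: xs).getD (c + 1 + i - 1) "" = (y :: ys).getD (i - 1) "" := by
      have heq : c + 1 + i - 1 = c + 1 + (i - 1) := by omega
      rw [heq]
      have := pvGetD_cons_shift x xs (i - 1)
      rw [h] at this
      exact this
    simp only [Function.comp_apply, h1, h2]
  rw [hcong]
  have : (1 : Nat) + c = c + 1 := by omega
  rw [this]
  rfl

theorem pvCutsN_cons (x : String) (xs : List String) (y : String) (ys : List String)
    (h : xs.drop (pvCountRun x xs) = y :: ys) :
    pvCutsN (x :: xs) =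
      0 :: (pvCutsN (y :: ys)).map (fun i => pvCountRun x xs + 1 + i) := by
  set c := pvCountRun x xs with hc
  have hlen : xs.length = c + (ys.length + 1) := by
    have hld := List.length_drop (l := xs) (i := c)
    rw [h] at hld
    have := pvCountRun_le x xs
    simp at hld; omega
  unfold pvCutsN
  rw [pvChg_cons x xs y ys h]
  simp [hlen]
  exact ⟨hc.symm, fun _ _ => hc.symm, by omega⟩

theorem pvSegs_run_nil (x : String) (xs : List String)
    (h : xs.drop (pvCountRun x xs) = []) :
    pvSegs (x :: xs) = [(x, ((1 + pvCountRun x xs : Nat) : Int))] := by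
  set c := pvCountRun x xs with hc
  have hlen : xs.length = c := by
    have hld := List.length_drop (l := xs) (i := c)
    rw [h] at hld
    have := pvCountRun_le x xs
    simp at hld; omega
  unfold pvSegs pvCutsN
  rw [pvChg_cons_nil x xs (hc ▸ h)]
  simp [hlen]
  omega

theorem pvSegs_cons (x : String) (xs : List String) (y : String) (ys : List String)
    (hd : xs.drop (pvCountRun x xs) = y :: ys) :
    pvSegs (x :: xs) =
      (x, ((1 + pvCountRun x xs : Nat) : Int)) :: pvSegs (y :: ys) := by
  set c := pvCountRun x xs with hc
  obtain ⟨M, hM⟩ : ∃ M, pvCutsN (y :: ys) = 0 :: M := ⟨_, rfl⟩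
  unfold pvSegs
  rw [pvCutsN_cons x xs y ys (hc ▸ hd), hM]
  simp only [List.drop_succ_cons, List.drop_zero]
  have hC : List.map (fun i => c + 1 + i) ((0 : Nat) :: M)
      = (c + 1) :: List.map (fun i => c + 1 + i) M := by simp
  rw [hC, List.zip_cons_cons, ← hC,
      show List.map (fun i => c + 1 + i) M
        = List.map (fun i => c + 1 + i) (((0 : Nat) :: M).drop 1) from rfl,
      List.zip_map]
  simp only [List.drop_succ_cons, List.drop_zero, List.map_cons, List.map_map]
  congr 1
  · rw [show ((x :: xs).getD 0 "") = x from rfl]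
    congr 1
    push_cast
    omega
  · congr 1
    funext se
    obtain ⟨s, e⟩ := se
    simp only [Function.comp_apply, Prod.map_apply]
    congr 1
    · have := pvGetD_cons_shift x xs s
      rw [hd] at this
      simpa [hc] using this
    · push_cast; ring

theorem pvSegs_eq_pvRuns_bounded : ∀ (n : Nat) (l : List String), l.length ≤ n → l ≠ [] →
    pvSegs l = pvRuns l := by
  intro n
  induction n with
  | zero =>
    intro l hl hne
    cases l with
    | nil => exact absurd rfl hne
    | cons x xs => simp at hl
  | succ n ih =>
    intro l hl hne
    match l with
    | x :: xs =>
      rw [pvRuns]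
      match hd : xs.drop (pvCountRun x xs) with
      | [] =>
        rw [pvSegs_run_nil x xs hd]
        simp [pvRuns]
      | y :: ys =>
        rw [pvSegs_cons x xs y ys hd]
        congr 1
        apply ih
        · have h1 := List.length_drop (l := xs) (i := pvCountRun x xs)
          rw [hd] at h1
          simp at hl h1 ⊢
          omega
        · simp

theorem pvGoA_eq_foldl_bounded : ∀ (n : Nat) (l : List String), l.length ≤ n →
    ∀ (out : PySem.Dict String Int),
    pvGoA l out = (pvRuns l).foldl
      (fun out g => out.insert g.1 (max (out.getD g.1 0) g.2)) out := by
  intro n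
  induction n with
  | zero =>
    intro l hl out
    have : l = [] := List.length_eq_zero_iff.mp (Nat.le_zero.mp hl)
    subst this
    simp [pvGoA, pvRuns]
  | succ n ih =>
    intro l hl out
    match l with
    | [] => simp [pvGoA, pvRuns]
    | x :: xs =>
      rw [pvGoA, pvRuns, List.foldl_cons]
      exact ih _ (by simp at hl ⊢; omega) _

-- stage 1 of B equals its Nat mirror
theorem pvChanges_eq (l : List String) :
    pvChanges l = (pvChg l).map (fun i : Nat => (i : Int)) := by
  unfold pvChanges pvChg
  rw [PySem.List.pyRange_one]
  have hN : ((l.length : Int) - 1).toNat = l.length - 1 := by omega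
  rw [hN, List.range'_eq_map_range, List.filter_map, List.filter_map, List.map_map]
  congr 1
  apply List.filter_congr
  intro k _
  simp only [Function.comp_apply]
  have h1 : (1 : Int) + (k : Int) = ((1 + k : Nat) : Int) := by omega
  rw [h1, show ((1 + k : Nat) : Int) - 1 = ((k : Nat) : Int) by push_cast; ring,
    PySem.List.pyGetD_natCast, PySem.List.pyGetD_natCast,
    show 1 + k - 1 = k from by omega]

theorem pvCuts_eq (l : List String) :
    pvCuts l = (pvCutsN l).map (fun i : Nat => (i : Int)) := by
  unfold pvCuts pvCutsN
  rw [pvChanges_eq]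
  simp

-- B's fold over the Int cuts equals the fold of maxima over the (label, length) segments
theorem pvFoldB_eq_segs (l : List String) :
    ((pvCuts l).zip ((pvCuts l).drop 1)).foldl
      (fun out se =>
        let label := PySem.List.pyGetD l se.1 ""
        out.insert label (max (out.getD label 0) (se.2 - se.1)))
      PySem.Dict.empty =
    (pvSegs l).foldl
      (fun out g => out.insert g.1 (max (out.getD g.1 0) g.2)) PySem.Dict.empty := by
  rw [pvCuts_eq, ← List.map_drop, List.zip_map, List.foldl_map]
  unfold pvSegs
  rw [List.foldl_map]
  congr 1
  funext out se
  obtain ⟨s, e⟩ := se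
  simp [PySem.List.pyGetD_natCast]

-- ===== VERDICT (by name: the statement is the Claim_ definition above) =====
theorem phase_durations_spec : Claim_equal_phase_durations := by
  intro l _
  unfold Spec_phase_durations phase_durations phase_durations_alt
  split
  · rfl
  · rename_i hne
    rw [pvFoldB_eq_segs, pvSegs_eq_pvRuns_bounded l.length l (Nat.le_refl _) hne,
      pvGoA_eq_foldl_bounded l.length l (Nat.le_refl _)]
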